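-- pv_equiv track=rewrite | github.com/TermanEmil/university_labs | APA_Catruc/lab4/code/shortest_path_dijkstra.py | tree_to_dict
-- ===== SOURCE A (Python) =====
-- def tree_to_dict(tree):
-- 	tree_dict = dict()
-- 	for start, end, length in tree:
-- 		dict_key = (start, end)
-- 		if dict_key in tree_dict:
-- 			if length < tree_dict[dict_key]:
-- 				tree_dict[dict_key] = length
-- 		else:
-- 			tree_dict[dict_key] = length
-- 	return tree_dict
-- ===== SOURCE B (Python) =====
-- def tree_to_dict(tree):
-- 	groups = {}
-- 	for start, end, length in tree:
-- 		groups.setdefault((start, end), []).append(length)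
-- 	return {key: min(lengths) for key, lengths in groups.items()}
-- ===== Notes on version B (the rewrite author's own statement) =====
-- stated objective: alternative
-- what changed: B separates collection from reduction: one pass groups all lengths per (start,end) key into lists, then a dict comprehension reduces each group with min, instead of A's single pass maintaining a running minimum with an explicit membership/compare branch.
import Mathlib
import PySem

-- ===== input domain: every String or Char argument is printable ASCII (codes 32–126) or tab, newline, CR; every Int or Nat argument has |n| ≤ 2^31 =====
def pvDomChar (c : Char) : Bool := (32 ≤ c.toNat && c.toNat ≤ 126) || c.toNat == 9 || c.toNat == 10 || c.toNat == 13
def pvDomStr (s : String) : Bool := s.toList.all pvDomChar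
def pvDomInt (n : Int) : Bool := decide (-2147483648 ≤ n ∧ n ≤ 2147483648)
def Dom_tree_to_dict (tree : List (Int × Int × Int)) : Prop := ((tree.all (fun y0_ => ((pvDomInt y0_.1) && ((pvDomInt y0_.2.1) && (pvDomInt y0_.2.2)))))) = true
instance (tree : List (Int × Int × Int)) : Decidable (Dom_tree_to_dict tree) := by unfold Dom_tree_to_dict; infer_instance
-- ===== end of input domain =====

-- B separates collection from reduction: one pass groups all lengths per (start,end) key into
-- lists, then a second pass reduces each group with min; A keeps a running minimum in one pass.

-- ===== PORT A =====
-- single pass: membership test, compare with the stored minimum, conditional overwrite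
def tree_to_dict (tree : List (Int × Int × Int)) : List (Int × Int × Int) :=
  let tree_dict := tree.foldl (fun d t =>
    let dict_key := (t.1, t.2.1)
    if d.contains dict_key then
      if t.2.2 < d.getD dict_key 0 then d.insert dict_key t.2.2 else d
    else d.insert dict_key t.2.2) (PySem.Dict.empty)
  tree_dict.items.map (fun p => (p.1.1, p.1.2, p.2))

-- ===== PORT B =====
-- pass 1: groups.setdefault((start, end), []).append(length)  =  modify with default []
-- pass 2: {key: min(lengths) for key, lengths in groups.items()}
def tree_to_dict_alt (tree : List (Int × Int × Int)) : List (Int × Int × Int) :=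
  let groups := tree.foldl (fun g t =>
    g.modify (t.1, t.2.1) [] (fun ls => ls ++ [t.2.2])) (PySem.Dict.empty)
  groups.items.map (fun p => (p.1.1, p.1.2, (PySem.List.min? p.2 (fun x => x)).getD 0))

-- ===== PRECONDITION & SPEC =====
def Spec_tree_to_dict (tree : List (Int × Int × Int)) (out : List (Int × Int × Int)) : Prop := out = tree_to_dict_alt tree
instance (tree : List (Int × Int × Int)) (out : List (Int × Int × Int)) : Decidable (Spec_tree_to_dict tree out) := by unfold Spec_tree_to_dict; infer_instance

-- ===== CLAIM (what is proved, stated in full; the proofs are below) =====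
def Claim_equal_tree_to_dict : Prop := ∀ (tree : List (Int × Int × Int)), Dom_tree_to_dict tree → Spec_tree_to_dict tree (tree_to_dict tree)

-- ===== LEMMAS AND PROOFS =====

-- the grouping key of an edge
def pvKey (t : Int × Int × Int) : Int × Int := (t.1, t.2.1)

-- A's loop step
def pvStepA (d : PySem.Dict (Int × Int) Int) (t : Int × Int × Int) : PySem.Dict (Int × Int) Int :=
  if d.contains (pvKey t) then
    if t.2.2 < d.getD (pvKey t) 0 then d.insert (pvKey t) t.2.2 else d
  else d.insert (pvKey t) t.2.2

-- B's grouping step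
def pvStepB (g : PySem.Dict (Int × Int) (List Int)) (t : Int × Int × Int) : PySem.Dict (Int × Int) (List Int) :=
  g.modify (t.1, t.2.1) [] (fun ls => ls ++ [t.2.2])

-- running minimum over an optional accumulator (characterises A's stored value)
def pvFoldMin (o : Option Int) (ls : List Int) : Option Int :=
  ls.foldl (fun o x => some (match o with | none => x | some v => if x < v then x else v)) o

theorem pvStepA_keys (d : PySem.Dict (Int × Int) Int) (t : Int × Int × Int) :
    (pvStepA d t).keys = PySem.Set.add d.keys (pvKey t) := by
  unfold pvStepA PySem.Set.add
  rcases h : d.contains (pvKey t) with _ | _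
  · simp [PySem.Dict.keys_insert_of_not_contains d t.2.2 h,
      PySem.Set.contains, ← PySem.Dict.contains_iff_mem_keys, h]
  · have hk : pvKey t ∈ d.keys := (PySem.Dict.contains_iff_mem_keys d (pvKey t)).1 h
    simp [PySem.Set.contains, hk]
    split_ifs <;> simp [PySem.Dict.keys_insert_of_contains d t.2.2 h]

theorem pvKeysA (tree : List (Int × Int × Int)) (d : PySem.Dict (Int × Int) Int) :
    (tree.foldl pvStepA d).keys = PySem.Set.update d.keys (tree.map pvKey) := by
  induction tree generalizing d with
  | nil => simp [PySem.Set.update]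
  | cons t rest ih =>
      simp only [List.foldl_cons, List.map_cons, ih, PySem.Set.update, List.foldl_cons, pvStepA_keys]

theorem pvGetA (tree : List (Int × Int × Int)) (d : PySem.Dict (Int × Int) Int) (k : Int × Int) :
    (tree.foldl pvStepA d).get? k
      = pvFoldMin (d.get? k) ((tree.filter (fun t => pvKey t == k)).map (fun t => t.2.2)) := by
  induction tree generalizing d with
  | nil => simp [pvFoldMin]
  | cons t rest ih =>
      simp only [List.foldl_cons, List.filter_cons, ih]
      by_cases hk : pvKey t = k
      · subst hk
        have hstep : (pvStepA d t).get? (pvKey t)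
            = some (match d.get? (pvKey t) with | none => t.2.2 | some v => if t.2.2 < v then t.2.2 else v) := by
          unfold pvStepA
          rcases h : d.contains (pvKey t) with _ | _
          · have : d.get? (pvKey t) = none := by
              rcases h2 : d.get? (pvKey t) with _ | v
              · rfl
              · exfalso
                have := PySem.Dict.contains_eq_isSome_get? d (pvKey t)
                rw [h, h2] at this; simp at this
            simp [this, PySem.Dict.get?_insert_self]
          · rcases h2 : d.get? (pvKey t) with _ | v
            · exfalso
              have := PySem.Dict.contains_eq_isSome_get? d (pvKey t)
              rw [h, h2] at this; simp at this
            · have hg : d.getD (pvKey t) 0 = v := PySem.Dict.getD_of_get?_eq_some d 0 h2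
              rw [hg]
              by_cases hlt : t.2.2 < v
              · simp [hlt, PySem.Dict.get?_insert_self]
              · simp [hlt, h2]
        simp only [hstep, beq_self_eq_true, if_pos, List.map_cons, pvFoldMin, List.foldl_cons]
      · have hb : (pvKey t == k) = false := by simp [hk]
        have hstep : (pvStepA d t).get? k = d.get? k := by
          unfold pvStepA
          split_ifs <;> simp [PySem.Dict.get?_insert_of_ne _ _ (Ne.symm hk)]
        simp [hstep, hb]

theorem pvFoldMin_some (x : Int) (ls : List Int) :
    pvFoldMin (some x) ls = some (ls.foldl min x) := by
  induction ls generalizing x with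
  | nil => rfl
  | cons y t ih =>
      simp only [pvFoldMin, List.foldl_cons] at *
      rw [ih]
      have hmin : (if y < x then y else x) = min x y := by
        split_ifs with h <;> omega
      rw [hmin]

theorem pvFoldB (tree : List (Int × Int × Int)) :
    tree.foldl pvStepB PySem.Dict.empty
      = (tree.map (fun t => (pvKey t, t.2.2))).foldl
          (fun d p => d.modify p.1 [] (fun ls => ls ++ [p.2])) PySem.Dict.empty := by
  rw [List.foldl_map]
  rfl

theorem pvGetB (tree : List (Int × Int × Int)) (k : Int × Int) :
    (tree.foldl pvStepB PySem.Dict.empty).getD k []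
      = (tree.filter (fun t => pvKey t == k)).map (fun t => t.2.2) := by
  rw [pvFoldB, PySem.Dict.getD_foldl_modify_append]
  simp [List.filter_map, List.map_map, Function.comp_def]

-- ===== VERDICT (by name: the statement is the Claim_ definition above) =====
theorem tree_to_dict_spec : Claim_equal_tree_to_dict := by
  intro tree _
  unfold Spec_tree_to_dict
  show (tree.foldl pvStepA PySem.Dict.empty).items.map (fun p => (p.1.1, p.1.2, p.2))
      = (tree.foldl pvStepB PySem.Dict.empty).items.map
          (fun p => (p.1.1, p.1.2, (PySem.List.min? p.2 (fun x => x)).getD 0))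
  have hKB : (tree.foldl pvStepB PySem.Dict.empty).keys
      = PySem.Set.update (PySem.Dict.empty (κ := Int × Int) (ν := List Int)).keys (tree.map pvKey) := by
    have := PySem.Dict.keys_foldl_modify_key tree (fun t => (t.1, t.2.1)) []
      (fun _ t ls => ls ++ [t.2.2]) PySem.Dict.empty
    simpa [pvStepB, pvKey] using this
  have hKA : (tree.foldl pvStepA PySem.Dict.empty).keys
      = (tree.foldl pvStepB PySem.Dict.empty).keys := by
    rw [pvKeysA, hKB]
    simp [PySem.Dict.keys_empty]
  have hnodB : (tree.foldl pvStepB PySem.Dict.empty).keys.Nodup := by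
    have := PySem.Dict.nodup_keys_foldl_modify_key tree (fun t => (t.1, t.2.1)) []
      (fun _ t ls => ls ++ [t.2.2]) PySem.Dict.empty (by simp)
    simpa [pvStepB, pvKey] using this
  have hnodA : (tree.foldl pvStepA PySem.Dict.empty).keys.Nodup := by
    rw [hKA]; exact hnodB
  rw [PySem.Dict.items_eq_map_keys _ hnodA 0, PySem.Dict.items_eq_map_keys _ hnodB [],
    List.map_map, List.map_map, hKA]
  apply List.map_congr_left
  intro k hk
  -- k is the key of some edge of tree, so its group is nonempty
  have hmem : ∃ t ∈ tree, pvKey t = k := by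
    rw [hKB] at hk
    rcases (PySem.Set.mem_update _ _ _).1 hk with h | h
    · simp [PySem.Dict.keys_empty] at h
    · simpa using List.mem_map.1 h
  obtain ⟨t, htmem, htk⟩ := hmem
  have htf : t ∈ tree.filter (fun t => pvKey t == k) := by
    simp [List.mem_filter, htmem, htk]
  have hA : (tree.foldl pvStepA PySem.Dict.empty).getD k 0
      = ((PySem.List.min? ((tree.filter (fun t => pvKey t == k)).map (fun t => t.2.2)) (fun x => x)).getD 0) := by
    rw [PySem.Dict.getD_eq_get?_getD, pvGetA, PySem.Dict.get?_empty]
    rcases hls : (tree.filter (fun t => pvKey t == k)).map (fun t => t.2.2) with _ | ⟨x, rest⟩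
    · exfalso
      have : t.2.2 ∈ (tree.filter (fun t => pvKey t == k)).map (fun t => t.2.2) :=
        List.mem_map.2 ⟨t, htf, rfl⟩
      rw [hls] at this; simp at this
    · have h1 : pvFoldMin none (x :: rest) = pvFoldMin (some x) rest := by
        simp [pvFoldMin]
      rw [hls, h1, pvFoldMin_some, PySem.List.min?_id_cons]
  simp only [Function.comp_def, hA, pvGetB]
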